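-- pv_equiv track=rewrite | github.com/spesmilo/electrum | electrum/plugin.py | _get_macos_osascript_command
-- ===== SOURCE A (Python) =====
-- from typing import (NamedTuple, Any, Union, TYPE_CHECKING, Optional, Tuple,
--                     Dict, Iterable, List, Sequence, Callable, TypeVar, Mapping)
--
-- def _get_macos_osascript_command(commands: List[str]) -> List[str]:
--     """
--     Inspired by
--     https://github.com/barneygale/elevate/blob/01263b690288f022bf6fa702711ac96816bc0e74/elevate/posix.py
--     Wraps the given commands in a macOS osascript command to prompt for root permissions.
--     """
--     from shlex import quote
--
--     def quote_shell(args):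
--         return " ".join(quote(arg) for arg in args)
--
--     def quote_applescript(string):
--         charmap = {
--             "\n": "\\n",
--             "\r": "\\r",
--             "\t": "\\t",
--             "\"": "\\\"",
--             "\\": "\\\\",
--         }
--         return '"%s"' % "".join(charmap.get(char, char) for char in string)
--
--     commands = [
--         "osascript",
--         "-e",
--         "do shell script %s "
--         "with administrator privileges "
--         "without altering line endings"
--         % quote_applescript(quote_shell(commands))
--     ]
--     return commands
-- ===== SOURCE B (Python) =====
-- # B fuses A's two stages: each argument is shell-quoted AND AppleScript-escaped in one
-- # single pass (the quote-replacement for ' is emitted already escaped), so there is no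
-- # intermediate quoted/joined string and no second escaping scan over it.
-- _SAFE = frozenset(
--     "abcdefghijklmnopqrstuvwxyzABCDEFGHIJKLMNOPQRSTUVWXYZ0123456789_@%+=:,./-")
--
-- def _get_macos_osascript_command(commands):
--     parts = []
--     for arg in commands:
--         if arg and all(c in _SAFE for c in arg):
--             parts.append(arg)  # safe chars need neither quoting nor escaping
--         else:
--             buf = ["'"]
--             for c in arg:
--                 if c == "'":
--                     buf.append("'\\\"'\\\"'")   # shell-quote replacement, pre-escaped
--                 elif c == "\\":
--                     buf.append("\\\\")
--                 elif c == "\n":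
--                     buf.append("\\n")
--                 elif c == "\r":
--                     buf.append("\\r")
--                 elif c == "\t":
--                     buf.append("\\t")
--                 elif c == '"':
--                     buf.append('\\"')
--                 else:
--                     buf.append(c)
--             buf.append("'")
--             parts.append("".join(buf))
--     return ["osascript", "-e",
--             'do shell script "' + " ".join(parts) +
--             '" with administrator privileges without altering line endings']
-- ===== Notes on version B (the rewrite author's own statement) =====
-- stated objective: alternative
-- what changed: B fuses A's two stages (shlex-quote each arg, join, then a second per-character charmap escaping pass over the whole joined string) into one single pass per argument that emits the shell-quoted AND AppleScript-escaped text directly (the quote replacement for ' is emitted pre-escaped), so the intermediate quoted/joined string and the second scan disappear.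
import Mathlib
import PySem

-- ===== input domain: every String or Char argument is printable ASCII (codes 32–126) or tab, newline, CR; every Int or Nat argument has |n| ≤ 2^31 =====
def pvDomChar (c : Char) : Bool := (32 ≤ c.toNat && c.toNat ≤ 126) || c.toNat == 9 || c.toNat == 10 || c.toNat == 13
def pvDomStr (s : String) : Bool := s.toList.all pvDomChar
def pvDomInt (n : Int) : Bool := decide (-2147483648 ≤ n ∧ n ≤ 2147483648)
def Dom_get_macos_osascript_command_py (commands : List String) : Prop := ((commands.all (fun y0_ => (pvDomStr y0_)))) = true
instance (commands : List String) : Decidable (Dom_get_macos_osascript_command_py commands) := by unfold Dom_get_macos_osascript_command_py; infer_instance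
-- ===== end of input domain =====

-- B fuses A's two stages (quote each arg, join, then a second charmap escaping pass over the
-- joined string) into one single pass per argument emitting the final escaped text directly;
-- same return value, no side effects.

-- ===== PORT A =====
-- shlex.quote's safe characters: re [\w@%+=:,./-] with re.ASCII (shared library fact)
def pvSafeChar (c : Char) : Bool :=
  ('a' ≤ c && c ≤ 'z') || ('A' ≤ c && c ≤ 'Z') || ('0' ≤ c && c ≤ '9') ||
  c == '_' || c == '@' || c == '%' || c == '+' || c == '=' || c == ':' ||
  c == ',' || c == '.' || c == '/' || c == '-'

-- shlex.quote as A calls it: empty → "''"; no unsafe char found → unchanged; else wrap in ' with ' → '"'"'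
def pvQuoteA (s : List Char) : List Char :=
  if s = [] then ['\'', '\'']
  else if s.any (fun c => !pvSafeChar c) then
    '\'' :: PySem.Chars.replace s ['\''] "'\"'\"'".toList ++ ['\'']
  else s

-- quote_applescript's charmap.get(char, char), one lookup per character
def pvCharmapA (c : Char) : List Char :=
  if c = '\n' then ['\\', 'n']
  else if c = '\r' then ['\\', 'r']
  else if c = '\t' then ['\\', 't']
  else if c = '"' then ['\\', '"']
  else if c = '\\' then ['\\', '\\']
  else [c]

def get_macos_osascript_command_py (commands : List String) : List String :=
  -- quote_shell: " ".join(quote(arg) for arg in args)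
  let joined := PySem.Chars.join [' '] (commands.map (fun a => pvQuoteA a.toList))
  -- quote_applescript: '"%s"' % "".join(charmap.get(char, char) for char in string)
  let qa := '"' :: joined.flatMap pvCharmapA ++ ['"']
  ["osascript", "-e",
   String.ofList ("do shell script ".toList ++ qa ++
     " with administrator privileges without altering line endings".toList)]

-- ===== PORT B =====
-- B's inner if/elif chain: the text emitted for one character of an unsafe argument
def pvFragChar (c : Char) : List Char :=
  if c = '\'' then "'\\\"'\\\"'".toList
  else if c = '\\' then ['\\', '\\']
  else if c = '\n' then ['\\', 'n']
  else if c = '\r' then ['\\', 'r']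
  else if c = '\t' then ['\\', 't']
  else if c = '"' then ['\\', '"']
  else [c]

-- B's per-argument single pass: safe args unchanged, else the buf loop ("'", pieces, "'")
def pvPart (arg : List Char) : List Char :=
  if arg ≠ [] && arg.all pvSafeChar then arg
  else (arg.foldl (fun buf c => buf ++ pvFragChar c) ['\'']) ++ ['\'']

def get_macos_osascript_command_py_alt (commands : List String) : List String :=
  let parts := commands.map (fun arg => pvPart arg.toList)
  ["osascript", "-e",
   String.ofList ("do shell script \"".toList ++ PySem.Chars.join [' '] parts ++
     "\" with administrator privileges without altering line endings".toList)]

-- ===== PRECONDITION & SPEC =====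
def Spec_get_macos_osascript_command_py (commands : List String) (out : List String) : Prop := out = get_macos_osascript_command_py_alt commands
instance (commands : List String) (out : List String) : Decidable (Spec_get_macos_osascript_command_py commands out) := by unfold Spec_get_macos_osascript_command_py; infer_instance

-- ===== CLAIM (what is proved, stated in full; the proofs are below) =====
def Claim_equal_get_macos_osascript_command_py : Prop := ∀ (commands : List String), Dom_get_macos_osascript_command_py commands → Spec_get_macos_osascript_command_py commands (get_macos_osascript_command_py commands)

-- ===== LEMMAS AND PROOFS =====

-- single-char replace is a flatMap
theorem replace_go_single (a : Char) (new : List Char) :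
    ∀ (l : List Char) (fuel : Nat) (acc : List Char), l.length ≤ fuel →
    PySem.Chars.replace.go [a] new fuel l acc
      = acc.reverse ++ l.flatMap (fun c => if c = a then new else [c]) := by
  intro l
  induction l with
  | nil =>
    intro fuel acc _
    cases fuel <;> simp [PySem.Chars.replace.go]
  | cons c t ih =>
    intro fuel acc h
    cases fuel with
    | zero => simp at h
    | succ n =>
      by_cases hc : c = a
      · subst hc
        have hp : List.isPrefixOf [c] (c :: t) = true := by simp [List.isPrefixOf]
        have hrec := ih n (new.reverse ++ acc) (by simpa using h)
        simp [PySem.Chars.replace.go, hp, hrec]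
      · have hp : List.isPrefixOf [a] (c :: t) = false := by
          simp [List.isPrefixOf]
          exact fun h' => hc h'.symm
        have hrec := ih n (c :: acc) (by simpa using h)
        simp [PySem.Chars.replace.go, hp, hrec, hc]

theorem replace_single (a : Char) (new : List Char) (l : List Char) :
    PySem.Chars.replace l [a] new = l.flatMap (fun c => if c = a then new else [c]) := by
  simp [PySem.Chars.replace, replace_go_single a new l l.length [] le_rfl]

theorem any_unsafe_eq_not_all (s : List Char) :
    s.any (fun c => !pvSafeChar c) = !s.all pvSafeChar := by
  induction s with
  | nil => rfl
  | cons a t ih => simp [List.any_cons, List.all_cons, ih, Bool.not_and]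

theorem foldl_append_frag (s : List Char) :
    ∀ init : List Char,
      s.foldl (fun buf c => buf ++ pvFragChar c) init = init ++ s.flatMap pvFragChar := by
  induction s with
  | nil => intro init; simp
  | cons a t ih => intro init; simp [List.foldl_cons, ih, List.append_assoc]

theorem flatMap_flatMap_assoc {α : Type} (f g : α → List α) (l : List α) :
    (l.flatMap f).flatMap g = l.flatMap (fun x => (f x).flatMap g) := by
  induction l with
  | nil => rfl
  | cons a t ih => simp [ih]

theorem intercalate_cons₂ (sep a b : List Char) (u : List (List Char)) :
    List.intercalate sep (a :: b :: u) = a ++ sep ++ List.intercalate sep (b :: u) := by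
  simp [List.intercalate, List.intersperse]

theorem charmap_of_safe {c : Char} (h : pvSafeChar c = true) : pvCharmapA c = [c] := by
  have h1 : c ≠ '\n' := by rintro rfl; simp [pvSafeChar] at h
  have h2 : c ≠ '\r' := by rintro rfl; simp [pvSafeChar] at h
  have h3 : c ≠ '\t' := by rintro rfl; simp [pvSafeChar] at h
  have h4 : c ≠ '"' := by rintro rfl; simp [pvSafeChar] at h
  have h5 : c ≠ '\\' := by rintro rfl; simp [pvSafeChar] at h
  simp [pvCharmapA, h1, h2, h3, h4, h5]

theorem charmap_eq_frag_of_ne {c : Char} (h : c ≠ '\'') : pvCharmapA c = pvFragChar c := by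
  by_cases h1 : c = '\n'; · subst h1; decide
  by_cases h2 : c = '\r'; · subst h2; decide
  by_cases h3 : c = '\t'; · subst h3; decide
  by_cases h4 : c = '"'; · subst h4; decide
  by_cases h5 : c = '\\'; · subst h5; decide
  simp [pvCharmapA, pvFragChar, h, h1, h2, h3, h4, h5]

-- escaping A's quoted argument yields B's fused fragment
theorem escape_quoteA (s : List Char) :
    (pvQuoteA s).flatMap pvCharmapA = pvPart s := by
  unfold pvQuoteA pvPart
  rcases eq_or_ne s [] with rfl | hne
  · decide
  · rw [if_neg hne, any_unsafe_eq_not_all, foldl_append_frag]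
    by_cases hall : s.all pvSafeChar = true
    · rw [hall]
      rw [if_neg (by simp), if_pos (by simp [hne])]
      have : ∀ c ∈ s, pvCharmapA c = [c] := by
        intro c hc
        exact charmap_of_safe (by
          have := List.all_eq_true.mp hall c hc; simpa using this)
      calc s.flatMap pvCharmapA = s.flatMap (fun c => [c]) := List.flatMap_congr this
        _ = s := by simp
    · rw [Bool.eq_false_iff.mpr hall]
      rw [if_pos (by simp), if_neg (by simp)]
      simp only [List.flatMap_cons, List.flatMap_append]
      have hq : pvCharmapA '\'' = ['\''] := by decide
      rw [replace_single, flatMap_flatMap_assoc]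
      have : s.flatMap (fun c => (if c = '\'' then "'\"'\"'".toList else [c]).flatMap pvCharmapA)
          = s.flatMap pvFragChar := by
        apply List.flatMap_congr
        intro c _
        by_cases hc : c = '\''
        · subst hc; decide
        · simp [hc, charmap_eq_frag_of_ne hc]
      rw [this]
      simp [hq]

-- flatMap distributes over intercalate
theorem flatMap_intercalate (f : Char → List Char) (sep : List Char) :
    ∀ l : List (List Char),
      (List.intercalate sep l).flatMap f
        = List.intercalate (sep.flatMap f) (l.map (·.flatMap f)) := by
  intro l
  induction l with
  | nil => simp [List.intercalate]
  | cons a t ih =>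
    cases t with
    | nil => simp [List.intercalate]
    | cons b u =>
      rw [intercalate_cons₂, List.map_cons, List.map_cons, intercalate_cons₂]
      simp [List.flatMap_append, ih, List.map_cons, List.append_assoc]

-- ===== VERDICT (by name: the statement is the Claim_ definition above) =====
theorem get_macos_osascript_command_py_spec : Claim_equal_get_macos_osascript_command_py := by
  intro commands _
  unfold Spec_get_macos_osascript_command_py
  unfold get_macos_osascript_command_py get_macos_osascript_command_py_alt
  simp only [PySem.Chars.join, flatMap_intercalate, List.map_map]
  have hsep : ([' '] : List Char).flatMap pvCharmapA = [' '] := by decide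
  rw [hsep]
  have : (fun a : String => (pvQuoteA a.toList).flatMap pvCharmapA) ∘ id
      = fun a : String => pvPart a.toList := by
    funext a; simp [escape_quoteA]
  simp only [Function.comp_def, escape_quoteA]
  simp [List.append_assoc]
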